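-- pv_equiv track=rewrite | github.com/SINGHBP29/HackForge | Backend/routes/mcp.py | _identify_conversation_themes
-- ===== SOURCE A (Python) =====
-- from typing import Dict, List, Any, Optional, Sequence
--
-- def _identify_conversation_themes(keywords: List[str]) -> List[str]:
--     """Identify conversation themes from keywords"""
--     themes = []
--     theme_keywords = {
--         "relationships": ["friend", "family", "partner", "love", "relationship"],
--         "work_school": ["work", "job", "school", "study", "boss", "teacher"],
--         "health": ["health", "sick", "pain", "doctor", "medicine"],
--         "personal_growth": ["goal", "dream", "future", "change", "improve"],
--         "stress": ["stress", "pressure", "overwhelmed", "busy", "tired"]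
--     }
--
--     keywords_lower = [kw.lower() for kw in keywords]
--
--     for theme, theme_words in theme_keywords.items():
--         if any(tw.lower() in keywords_lower for tw in theme_words):
--             themes.append(theme)
--
--     return themes
-- ===== SOURCE B (Python) =====
-- from typing import List
--
-- # theme names in the fixed emission order
-- _THEMES = ["relationships", "work_school", "health", "personal_growth", "stress"]
--
-- # reverse index: lowercased theme word -> index of its theme in _THEMES
-- _WORD_INDEX = {
--     "friend": 0, "family": 0, "partner": 0, "love": 0, "relationship": 0,
--     "work": 1, "job": 1, "school": 1, "study": 1, "boss": 1, "teacher": 1,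
--     "health": 2, "sick": 2, "pain": 2, "doctor": 2, "medicine": 2,
--     "goal": 3, "dream": 3, "future": 3, "change": 3, "improve": 3,
--     "stress": 4, "pressure": 4, "overwhelmed": 4, "busy": 4, "tired": 4,
-- }
--
-- def _identify_conversation_themes(keywords: List[str]) -> List[str]:
--     """Identify conversation themes from keywords"""
--     hit = [False, False, False, False, False]
--     for kw in keywords:
--         i = _WORD_INDEX.get(kw.lower())
--         if i is not None:
--             hit[i] = True
--     return [t for t, h in zip(_THEMES, hit) if h]
-- ===== Notes on version B (the rewrite author's own statement) =====
-- stated objective: faster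
-- what changed: Replaces the per-theme scan of the keyword list with a prebuilt word-to-theme-index dict, one hash-lookup pass over the keywords that sets flags in a fixed boolean hit vector, and a final zip of the theme-order list with the flags.
import Mathlib
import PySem

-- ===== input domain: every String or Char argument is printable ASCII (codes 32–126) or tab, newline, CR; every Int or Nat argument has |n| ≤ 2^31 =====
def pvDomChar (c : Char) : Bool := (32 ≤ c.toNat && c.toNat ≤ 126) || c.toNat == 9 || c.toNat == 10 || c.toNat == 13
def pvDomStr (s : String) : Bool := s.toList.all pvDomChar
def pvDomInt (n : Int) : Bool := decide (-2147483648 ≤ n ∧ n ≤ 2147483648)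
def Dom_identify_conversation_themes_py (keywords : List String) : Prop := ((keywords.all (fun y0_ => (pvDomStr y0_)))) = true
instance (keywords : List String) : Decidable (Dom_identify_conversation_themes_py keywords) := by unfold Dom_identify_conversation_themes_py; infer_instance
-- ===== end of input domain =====

-- B replaces A's per-theme scan of the keyword list with a prebuilt word→theme-index dict,
-- one lookup pass over the keywords setting flags in a boolean hit vector, and a final
-- zip of the fixed theme-order list with the flags (faster: one pass plus hash lookups).

-- ===== PORT A =====
-- the literal theme_keywords dict of A, as an insertion-ordered association list
def pvAThemes : List (String × List String) :=
  [("relationships", ["friend", "family", "partner", "love", "relationship"]),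
   ("work_school", ["work", "job", "school", "study", "boss", "teacher"]),
   ("health", ["health", "sick", "pain", "doctor", "medicine"]),
   ("personal_growth", ["goal", "dream", "future", "change", "improve"]),
   ("stress", ["stress", "pressure", "overwhelmed", "busy", "tired"])]

def identify_conversation_themes_py (keywords : List String) : List String :=
  let keywords_lower := keywords.map PySem.Str.lower
  pvAThemes.foldl
    (fun themes p =>
      if p.2.any (fun tw => keywords_lower.contains (PySem.Str.lower tw)) then themes ++ [p.1]
      else themes) []

-- ===== PORT B =====
-- theme names in the fixed emission order
def pvThemes : List String := ["relationships", "work_school", "health", "personal_growth", "stress"]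

-- reverse index: lowercased theme word -> index of its theme in pvThemes
def pvWordIndex : PySem.Dict String Int :=
  PySem.Dict.mk
    [("friend", 0), ("family", 0), ("partner", 0), ("love", 0), ("relationship", 0),
     ("work", 1), ("job", 1), ("school", 1), ("study", 1), ("boss", 1), ("teacher", 1),
     ("health", 2), ("sick", 2), ("pain", 2), ("doctor", 2), ("medicine", 2),
     ("goal", 3), ("dream", 3), ("future", 3), ("change", 3), ("improve", 3),
     ("stress", 4), ("pressure", 4), ("overwhelmed", 4), ("busy", 4), ("tired", 4)]

def identify_conversation_themes_py_alt (keywords : List String) : List String :=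
  let hit : List Bool :=
    keywords.foldl
      (fun h kw =>
        match pvWordIndex.get? (PySem.Str.lower kw) with
        | some i => PySem.List.pySetD h i true   -- hit[i] = True (index always in range)
        | none => h)
      [false, false, false, false, false]
  ((pvThemes.zip hit).filter (fun p => p.2)).map Prod.fst

-- ===== PRECONDITION & SPEC =====
def Spec_identify_conversation_themes_py (keywords : List String) (out : List String) : Prop := out = identify_conversation_themes_py_alt keywords
instance (keywords : List String) (out : List String) : Decidable (Spec_identify_conversation_themes_py keywords out) := by unfold Spec_identify_conversation_themes_py; infer_instance

-- ===== CLAIM (what is proved, stated in full; the proofs are below) =====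
def Claim_equal_identify_conversation_themes_py : Prop := ∀ (keywords : List String), Dom_identify_conversation_themes_py keywords → Spec_identify_conversation_themes_py keywords (identify_conversation_themes_py keywords)

-- ===== LEMMAS AND PROOFS =====

-- any value get? returns on an association dict is one of its stored values
theorem get?_val_mem (x : String) (v : Int) (L : List (String × Int))
    (h : (PySem.Dict.mk L).get? x = some v) : v ∈ L.map Prod.snd := by
  induction L with
  | nil => simp [PySem.Dict.get?] at h
  | cons p rest ih =>
      rw [PySem.Dict.get?_mk_cons] at h
      split at h
      · simp_all
      · simp only [List.map_cons]
        exact List.mem_cons_of_mem _ (ih h)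

-- every value the reverse index returns is one of the indices 0..4
theorem idx_range (x : String) (i : Int) (h : pvWordIndex.get? x = some i) :
    i = 0 ∨ i = 1 ∨ i = 2 ∨ i = 3 ∨ i = 4 := by
  have hm := get?_val_mem x i _ (by unfold pvWordIndex at h; exact h)
  simp at hm
  omega

theorem pySetD_lit0 (b0 b1 b2 b3 b4 : Bool) :
    PySem.List.pySetD [b0, b1, b2, b3, b4] (0 : Int) true = [true, b1, b2, b3, b4] := by
  norm_num [PySem.List.pySetD, PySem.List.pySet?, PySem.List.pyIdx?, List.set]; try rfl

theorem pySetD_lit1 (b0 b1 b2 b3 b4 : Bool) :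
    PySem.List.pySetD [b0, b1, b2, b3, b4] (1 : Int) true = [b0, true, b2, b3, b4] := by
  norm_num [PySem.List.pySetD, PySem.List.pySet?, PySem.List.pyIdx?, List.set]; try rfl

theorem pySetD_lit2 (b0 b1 b2 b3 b4 : Bool) :
    PySem.List.pySetD [b0, b1, b2, b3, b4] (2 : Int) true = [b0, b1, true, b3, b4] := by
  norm_num [PySem.List.pySetD, PySem.List.pySet?, PySem.List.pyIdx?, List.set]; try rfl

theorem pySetD_lit3 (b0 b1 b2 b3 b4 : Bool) :
    PySem.List.pySetD [b0, b1, b2, b3, b4] (3 : Int) true = [b0, b1, b2, true, b4] := by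
  norm_num [PySem.List.pySetD, PySem.List.pySet?, PySem.List.pyIdx?, List.set]; try rfl

theorem pySetD_lit4 (b0 b1 b2 b3 b4 : Bool) :
    PySem.List.pySetD [b0, b1, b2, b3, b4] (4 : Int) true = [b0, b1, b2, b3, true] := by
  norm_num [PySem.List.pySetD, PySem.List.pySet?, PySem.List.pyIdx?, List.set]; try rfl

-- B's keyword fold: each flag ends up as "initial flag OR some keyword maps to this index"
theorem fold_hit (kws : List String) (b0 b1 b2 b3 b4 : Bool) :
    kws.foldl
      (fun h kw =>
        match pvWordIndex.get? (PySem.Str.lower kw) with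
        | some i => PySem.List.pySetD h i true
        | none => h)
      [b0, b1, b2, b3, b4]
    = [b0 || kws.any (fun kw => pvWordIndex.get? (PySem.Str.lower kw) == some 0),
       b1 || kws.any (fun kw => pvWordIndex.get? (PySem.Str.lower kw) == some 1),
       b2 || kws.any (fun kw => pvWordIndex.get? (PySem.Str.lower kw) == some 2),
       b3 || kws.any (fun kw => pvWordIndex.get? (PySem.Str.lower kw) == some 3),
       b4 || kws.any (fun kw => pvWordIndex.get? (PySem.Str.lower kw) == some 4)] := by
  induction kws generalizing b0 b1 b2 b3 b4 with
  | nil => simp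
  | cons kw rest ih =>
      simp only [List.foldl_cons, List.any_cons]
      cases h : pvWordIndex.get? (PySem.Str.lower kw) with
      | none => rw [ih]; simp
      | some i =>
          rcases idx_range _ _ h with hi | hi | hi | hi | hi <;> subst hi <;>
            simp only [pySetD_lit0, pySetD_lit1, pySetD_lit2, pySetD_lit3, pySetD_lit4] <;>
            rw [ih] <;> simp

-- lookup in a literal association dict = membership of the pair (keys assumed distinct)
theorem mem_assoc (t : Int) (x : String) (L : List (String × Int)) (hnd : (L.map Prod.fst).Nodup) :
    (PySem.Dict.mk L).get? x = some t ↔ (x, t) ∈ L := by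
  induction L with
  | nil => simp [PySem.Dict.get?]
  | cons p rest ih =>
      obtain ⟨k, v⟩ := p
      simp only [List.map_cons, List.nodup_cons] at hnd
      rw [PySem.Dict.get?_mk_cons, List.mem_cons]
      by_cases hkx : k = x
      · subst hkx
        have h1 : ((k, t) ∈ rest) ↔ False :=
          iff_false_intro (fun hm => hnd.1 (List.mem_map_of_mem hm))
        simp [Prod.ext_iff, h1, eq_comm]
      · have hbx : (k == x) = false := by simp [hkx]
        simp [hbx, ih hnd.2, Prod.ext_iff, Ne.symm hkx]

-- the reverse index hits index j exactly on theme j's own (lowercase) word list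
set_option maxRecDepth 8000 in
theorem idx_spec (j : Int) (ws : List String)
    (h : (j, ws) ∈ ([(0, ["friend", "family", "partner", "love", "relationship"]),
                     (1, ["work", "job", "school", "study", "boss", "teacher"]),
                     (2, ["health", "sick", "pain", "doctor", "medicine"]),
                     (3, ["goal", "dream", "future", "change", "improve"]),
                     (4, ["stress", "pressure", "overwhelmed", "busy", "tired"])] :
                    List (Int × List String))) :
    ∀ x, (pvWordIndex.get? x == some j) = ws.contains x := by
  fin_cases h <;> intro x <;>
    rw [Bool.eq_iff_iff] <;>
    simp only [beq_iff_eq, List.contains_iff_mem] <;>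
    unfold pvWordIndex <;>
    rw [mem_assoc _ _ _ (by decide)] <;>
    simp [Prod.ext_iff]

-- keyword-theme exchange: scanning theme words over the keyword list = scanning keywords over the word list
theorem exch (ws l : List String) :
    ws.any (fun w => l.contains w) = l.any (fun x => ws.contains x) := by
  apply Bool.eq_iff_iff.mpr
  simp only [List.any_eq_true, List.contains_iff_mem]
  constructor
  · rintro ⟨w, hw, hl⟩; exact ⟨w, hl, hw⟩
  · rintro ⟨x, hx, hw⟩; exact ⟨x, hw, hx⟩

-- A's condition for the theme at index j equals "some keyword maps to index j"
theorem cond_eq (kws : List String) (j : Int) (ws : List String)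
    (h : (j, ws) ∈ ([(0, ["friend", "family", "partner", "love", "relationship"]),
                     (1, ["work", "job", "school", "study", "boss", "teacher"]),
                     (2, ["health", "sick", "pain", "doctor", "medicine"]),
                     (3, ["goal", "dream", "future", "change", "improve"]),
                     (4, ["stress", "pressure", "overwhelmed", "busy", "tired"])] :
                    List (Int × List String)))
    (hlw : ws.map PySem.Str.lower = ws) :
    ws.any (fun tw => (kws.map PySem.Str.lower).contains (PySem.Str.lower tw))
    = kws.any (fun kw => pvWordIndex.get? (PySem.Str.lower kw) == some j) := by
  have h1 := List.any_map (l := ws) (f := PySem.Str.lower)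
    (p := fun tw => (kws.map PySem.Str.lower).contains tw)
  rw [hlw] at h1
  simp only [Function.comp_def] at h1
  rw [← h1, exch]
  have h2 := List.any_map (l := kws) (f := PySem.Str.lower)
    (p := fun x => ws.contains x)
  simp only [Function.comp_def] at h2
  rw [h2]
  congr 1
  funext kw
  exact (idx_spec j ws h (PySem.Str.lower kw)).symm

-- A's append-if fold over the five themes, in zip-with-flags form
theorem a_shape (P : String × List String → Bool) :
    pvAThemes.foldl (fun themes p => if P p then themes ++ [p.1] else themes) []
    = ((pvThemes.zip
          [P ("relationships", ["friend", "family", "partner", "love", "relationship"]),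
           P ("work_school", ["work", "job", "school", "study", "boss", "teacher"]),
           P ("health", ["health", "sick", "pain", "doctor", "medicine"]),
           P ("personal_growth", ["goal", "dream", "future", "change", "improve"]),
           P ("stress", ["stress", "pressure", "overwhelmed", "busy", "tired"])]).filter
        (fun p => p.2)).map Prod.fst := by
  simp only [pvAThemes, pvThemes, List.foldl_cons, List.foldl_nil]
  cases h0 : P ("relationships", ["friend", "family", "partner", "love", "relationship"]) <;>
  cases h1 : P ("work_school", ["work", "job", "school", "study", "boss", "teacher"]) <;>
  cases h2 : P ("health", ["health", "sick", "pain", "doctor", "medicine"]) <;>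
  cases h3 : P ("personal_growth", ["goal", "dream", "future", "change", "improve"]) <;>
  cases h4 : P ("stress", ["stress", "pressure", "overwhelmed", "busy", "tired"]) <;>
    simp [List.zip, List.filter]

-- ===== VERDICT (by name: the statement is the Claim_ definition above) =====
theorem identify_conversation_themes_py_spec : Claim_equal_identify_conversation_themes_py := by
  intro keywords _
  show identify_conversation_themes_py keywords = identify_conversation_themes_py_alt keywords
  simp only [identify_conversation_themes_py, identify_conversation_themes_py_alt]
  rw [a_shape, fold_hit]
  simp only [Bool.false_or]
  rw [cond_eq keywords 0 _ (by decide) (by decide),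
      cond_eq keywords 1 _ (by decide) (by decide),
      cond_eq keywords 2 _ (by decide) (by decide),
      cond_eq keywords 3 _ (by decide) (by decide),
      cond_eq keywords 4 _ (by decide) (by decide)]
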